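-- pv_equiv track=rewrite | github.com/ryado8/PY120 | lesson_2/rps_oop.py | display_moves
-- ===== SOURCE A (Python) =====
-- def display_moves(moves):
--     freq_dict = {}
--     result = []
--
--     for name in moves:
--         first_char = name[0].lower()
--         freq_dict[first_char] = freq_dict.get(first_char, 0) + 1
--
--         idx = freq_dict[first_char]
--         result.append(f"({name[:idx]}){name[idx:]}")
--
--     return ", ".join(result)
-- ===== SOURCE B (Python) =====
-- def display_moves(moves):
--     parts = []
--     for i, name in enumerate(moves):
--         idx = sum(1 for m in moves[:i + 1] if m[0].lower() == name[0].lower())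
--         parts.append(f"({name[:idx]}){name[idx:]}")
--     return ", ".join(parts)
-- ===== Notes on version B (the rewrite author's own statement) =====
-- stated objective: simpler
-- what changed: B drops A's running frequency dictionary and instead, for each position, recomputes the highlight length by rescanning the inclusive prefix moves[:i+1] and counting first-letter matches.
import Mathlib
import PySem

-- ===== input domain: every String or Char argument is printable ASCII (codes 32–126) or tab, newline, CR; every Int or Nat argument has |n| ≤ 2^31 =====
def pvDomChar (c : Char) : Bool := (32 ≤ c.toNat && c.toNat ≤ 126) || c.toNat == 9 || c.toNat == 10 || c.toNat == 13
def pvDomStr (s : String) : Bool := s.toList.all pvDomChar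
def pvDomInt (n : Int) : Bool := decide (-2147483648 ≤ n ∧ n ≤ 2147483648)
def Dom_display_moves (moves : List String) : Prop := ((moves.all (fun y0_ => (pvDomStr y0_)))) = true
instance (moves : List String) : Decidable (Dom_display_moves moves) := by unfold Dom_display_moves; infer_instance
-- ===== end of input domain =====

-- B replaces A's running frequency dictionary with a per-index rescan of the inclusive prefix (simpler, no dict).

-- name[0].lower() — shared sub-expression of both Pythons (total via pyGetD; Pre_ excludes "")
def pvKey (name : String) : Char :=
  PySem.Chars.lowerChar (PySem.List.pyGetD name.toList 0 ' ')

-- f"({name[:idx]}){name[idx:]}"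
def pvFmt (name : String) (idx : Int) : String :=
  String.ofList (('(' :: PySem.List.slice name.toList none (some idx)) ++
             (')' :: PySem.List.slice name.toList (some idx) none))

-- ===== PORT A =====
def display_moves (moves : List String) : String :=
  let st := moves.foldl
    (fun (st : PySem.Dict Char Int × List String) name =>
      let fc := pvKey name
      let d := st.1.insert fc (st.1.getD fc 0 + 1)
      let idx := d.getD fc 0
      (d, st.2 ++ [pvFmt name idx]))
    (PySem.Dict.empty, [])
  PySem.Str.join ", " st.2

-- ===== PORT B =====
def display_moves_alt (moves : List String) : String :=
  let parts := (PySem.List.enumerate moves 0).map (fun p =>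
    let name := p.2
    let idx : Int :=
      ((PySem.List.slice moves none (some (p.1 + 1))).countP
        (fun m => pvKey m == pvKey name) : Nat)
    pvFmt name idx)
  PySem.Str.join ", " parts

-- ===== PRECONDITION & SPEC =====
-- Pre_ excludes lists containing an empty string, on which Python A raises IndexError (name[0]).
def Pre_display_moves (moves : List String) : Prop := ∀ s ∈ moves, s ≠ ""
instance (moves : List String) : Decidable (Pre_display_moves moves) := by unfold Pre_display_moves; infer_instance
def pvWitness_display_moves : List String := ["rock", "paper", "scissors", "spock", "lizard"]

def Spec_display_moves (moves : List String) (out : String) : Prop := out = display_moves_alt moves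
instance (moves : List String) (out : String) : Decidable (Spec_display_moves moves out) := by unfold Spec_display_moves; infer_instance

-- ===== CLAIM (what is proved, stated in full; the proofs are below) =====
def Claim_equal_display_moves : Prop := ∀ (moves : List String), Dom_display_moves moves → Pre_display_moves moves → Spec_display_moves moves (display_moves moves)

-- ===== LEMMAS AND PROOFS =====

-- reference result list: entries of `rest`, given the already-processed prefix `pre`
def pvSpecList (pre rest : List String) : List String :=
  match rest with
  | [] => []
  | n :: rest =>
      pvFmt n (((pre ++ [n]).map pvKey).count (pvKey n) : Nat) :: pvSpecList (pre ++ [n]) rest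

-- A's dict after processing `pre`
def pvDictOf (pre : List String) : PySem.Dict Char Int :=
  pre.foldl (fun d n => d.insert (pvKey n) (d.getD (pvKey n) 0 + 1)) PySem.Dict.empty

lemma pvDictOf_getD (pre : List String) (c : Char) :
    (pvDictOf pre).getD c 0 = ((pre.map pvKey).count c : Int) := by
  have h := PySem.Dict.getD_foldl_insert_add_one (l := pre.map pvKey)
    (d := (PySem.Dict.empty : PySem.Dict Char Int)) (v := c)
  rw [List.foldl_map] at h
  unfold pvDictOf
  rw [h]
  simp [PySem.Dict.getD_empty]

lemma pvA_loop (rest : List String) : ∀ (pre : List String) (res : List String),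
    (rest.foldl
      (fun (st : PySem.Dict Char Int × List String) name =>
        (st.1.insert (pvKey name) (st.1.getD (pvKey name) 0 + 1),
         st.2 ++ [pvFmt name ((st.1.insert (pvKey name) (st.1.getD (pvKey name) 0 + 1)).getD (pvKey name) 0)]))
      (pvDictOf pre, res)).2 = res ++ pvSpecList pre rest := by
  induction rest with
  | nil => intro pre res; simp [pvSpecList]
  | cons n rest ih =>
      intro pre res
      have hd : (pvDictOf pre).insert (pvKey n) ((pvDictOf pre).getD (pvKey n) 0 + 1)
          = pvDictOf (pre ++ [n]) := by
        unfold pvDictOf; rw [List.foldl_append]; rfl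
      have hidx : (pvDictOf (pre ++ [n])).getD (pvKey n) 0
          = (((pre ++ [n]).map pvKey).count (pvKey n) : Int) := pvDictOf_getD _ _
      simp only [List.foldl_cons]
      rw [hd, hidx, ih (pre ++ [n])]
      simp [pvSpecList]

lemma pvB_loop (rest : List String) : ∀ (pre : List String),
    (PySem.List.enumerate rest (pre.length : Int)).map (fun p =>
      pvFmt p.2
        (((PySem.List.slice (pre ++ rest) none (some (p.1 + 1))).countP
          (fun m => pvKey m == pvKey p.2) : Nat) : Int)) = pvSpecList pre rest := by
  induction rest with
  | nil => intro pre; simp [PySem.List.enumerate_nil, pvSpecList]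
  | cons n rest ih =>
      intro pre
      rw [PySem.List.enumerate_cons]
      simp only [List.map_cons, pvSpecList]
      congr 1
      · -- head entry
        have hslice : PySem.List.slice (pre ++ n :: rest) none (some ((pre.length : Int) + 1))
            = pre ++ [n] := by
          have h1 : ((pre.length : Int) + 1) = ((pre.length + 1 : Nat) : Int) := by push_cast; ring
          rw [h1, PySem.List.slice_to_natCast]
          rw [List.take_append]
          simp
        have hcnt : ((pre ++ [n]).countP (fun m => pvKey m == pvKey n))
            = ((pre ++ [n]).map pvKey).count (pvKey n) := by
          rw [List.count_eq_countP, List.countP_map]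
          rfl
        rw [hslice, hcnt]
      · -- tail
        have h2 := ih (pre ++ [n])
        have e : (((pre ++ [n]).length : Nat) : Int) = (pre.length : Int) + 1 := by simp
        rw [e, List.append_assoc] at h2
        simpa using h2

-- ===== VERDICT (by name: the statement is the Claim_ definition above) =====
theorem display_moves_spec : Claim_equal_display_moves := by
  intro moves _ _
  unfold Spec_display_moves display_moves display_moves_alt
  have hA := pvA_loop moves [] []
  have hB := pvB_loop moves []
  simp only [pvDictOf, List.foldl_nil] at hA
  simp only [List.length_nil, Nat.cast_zero, List.nil_append] at hB
  simp only [List.nil_append] at hA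
  simp only []
  rw [show (PySem.Dict.empty : PySem.Dict Char Int) = pvDictOf [] from rfl] at *
  simp only [pvDictOf, List.foldl_nil] at *
  rw [hA, hB]
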